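-- pv_equiv track=rewrite | github.com/vinayakvadoothker/x-recruiter-poc | backend/orchestration/candidate_sourcer.py | _extract_languages_from_skills
-- ===== SOURCE A (Python) =====
-- from typing import List, Dict, Optional
--
-- def _extract_languages_from_skills(skills: List[str]) -> List[str]:
--     """
--     Extract programming languages from skills list.
--
--     Args:
--         skills: List of skill strings
--
--     Returns:
--         List of programming language names
--     """
--     common_languages = [
--         'python', 'javascript', 'java', 'typescript', 'go', 'rust', 'c++', 'c#',
--         'ruby', 'php', 'swift', 'kotlin', 'scala', 'r', 'matlab', 'c', 'cuda'
--     ]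
--
--     languages = []
--     skills_lower = [s.lower() for s in skills]
--
--     for lang in common_languages:
--         if lang in skills_lower or any(lang in skill for skill in skills_lower):
--             languages.append(lang.capitalize())
--
--     return languages
-- ===== SOURCE B (Python) =====
-- from typing import List
--
-- def _extract_languages_from_skills(skills: List[str]) -> List[str]:
--     common_languages = [
--         'python', 'javascript', 'java', 'typescript', 'go', 'rust', 'c++', 'c#',
--         'ruby', 'php', 'swift', 'kotlin', 'scala', 'r', 'matlab', 'c', 'cuda'
--     ]
--     # Dictionary-of-patterns window lookup: instead of running a substring
--     # search per language, slide over each skill once, taking the windows of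
--     # every pattern length and looking each window up in the language set.
--     lang_set = set(common_languages)
--     lengths = sorted({len(l) for l in common_languages})
--     found = set()
--     for skill in skills:
--         s = skill.lower()
--         for i in range(len(s)):
--             for L in lengths:
--                 w = s[i:i+L]
--                 if w in lang_set:
--                     found.add(w)
--     # ordered emission pass preserves the original output order and uniqueness
--     return [lang.capitalize() for lang in common_languages if lang in found]
-- ===== Notes on version B (the rewrite author's own statement) =====
-- stated objective: alternative
-- what changed: Replaces A's per-language substring search over all skills with a pattern-dictionary window scan: each skill is slid over once, taking windows of every pattern length and looking each window up in a language set; a separate ordered emission pass over common_languages preserves output order and uniqueness.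
import Mathlib
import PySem

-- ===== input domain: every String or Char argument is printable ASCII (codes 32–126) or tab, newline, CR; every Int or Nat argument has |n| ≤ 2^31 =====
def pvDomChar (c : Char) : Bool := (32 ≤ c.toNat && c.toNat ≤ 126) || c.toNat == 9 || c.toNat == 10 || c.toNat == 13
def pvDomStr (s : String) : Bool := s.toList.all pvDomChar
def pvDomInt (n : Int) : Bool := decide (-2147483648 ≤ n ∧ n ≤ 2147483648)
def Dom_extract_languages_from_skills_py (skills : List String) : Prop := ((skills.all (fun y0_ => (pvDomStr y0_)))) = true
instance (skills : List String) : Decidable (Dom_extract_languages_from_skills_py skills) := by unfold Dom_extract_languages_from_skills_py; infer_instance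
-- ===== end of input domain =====

-- B replaces the per-language substring search with a pattern-dictionary window
-- scan over each skill plus an ordered emission pass; same value ("alternative").

-- the shared literal list of languages
def pvCommonLangs : List String :=
  ["python", "javascript", "java", "typescript", "go", "rust", "c++", "c#",
   "ruby", "php", "swift", "kotlin", "scala", "r", "matlab", "c", "cuda"]

-- Python str.capitalize(): first char uppercased, the rest lowercased (exact on ASCII)
def pyCapitalize (s : String) : String :=
  match s.toList with
  | [] => s
  | c :: rest => String.ofList (PySem.Chars.upperChar c :: PySem.Chars.lower rest)

-- ===== PORT A =====
def extract_languages_from_skills_py (skills : List String) : List String :=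
  let skills_lower := skills.map PySem.Str.lower
  pvCommonLangs.foldl
    (fun languages lang =>
      if skills_lower.contains lang
          || skills_lower.any (fun skill => PySem.Str.isIn lang skill) then
        languages ++ [pyCapitalize lang]
      else languages) []

-- ===== PORT B =====
-- set(common_languages)
def pvLangSet : PySem.Set String := PySem.Set.ofList pvCommonLangs
-- sorted({len(l) for l in common_languages})
def pvLengths : List Int :=
  PySem.List.sorted (PySem.Set.ofList (pvCommonLangs.map PySem.Str.len)) (fun x => x) false

def extract_languages_from_skills_py_alt (skills : List String) : List String :=
  let found : PySem.Set String :=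
    skills.foldl
      (fun found skill =>
        let s := PySem.Str.lower skill
        (List.range (PySem.Str.len s).toNat).foldl
          (fun found (i : Nat) =>
            pvLengths.foldl
              (fun found L =>
                let w := PySem.Str.slice s (some (i : Int)) (some ((i : Int) + L))
                if PySem.Set.contains pvLangSet w then PySem.Set.add found w else found)
              found)
          found)
      PySem.Set.empty
  (pvCommonLangs.filter (fun lang => PySem.Set.contains found lang)).map pyCapitalize

-- ===== PRECONDITION & SPEC =====
def Spec_extract_languages_from_skills_py (skills : List String) (out : List String) : Prop := out = extract_languages_from_skills_py_alt skills
instance (skills : List String) (out : List String) : Decidable (Spec_extract_languages_from_skills_py skills out) := by unfold Spec_extract_languages_from_skills_py; infer_instance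

-- ===== CLAIM (what is proved, stated in full; the proofs are below) =====
def Claim_equal_extract_languages_from_skills_py : Prop := ∀ (skills : List String), Dom_extract_languages_from_skills_py skills → Spec_extract_languages_from_skills_py skills (extract_languages_from_skills_py skills)

-- ===== LEMMAS AND PROOFS =====

-- the concrete language data: every language is nonempty and its length is in pvLengths
theorem pvLang_facts : ∀ l ∈ pvCommonLangs, l.toList ≠ [] ∧ ((l.toList.length : Int) ∈ pvLengths) := by
  decide

theorem pvLengths_nonneg : ∀ L ∈ pvLengths, 0 ≤ L := by decide

-- membership in the innermost fold (over the window lengths, at one position i of s)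
theorem mem_len_fold (s : String) (i : Nat) (ls : List Int) (acc : PySem.Set String) (x : String) :
    x ∈ ls.foldl
        (fun found L =>
          let w := PySem.Str.slice s (some (i : Int)) (some ((i : Int) + L))
          if PySem.Set.contains pvLangSet w then PySem.Set.add found w else found) acc
      ↔ x ∈ acc ∨ (x ∈ pvLangSet ∧ ∃ L ∈ ls,
          PySem.Str.slice s (some (i : Int)) (some ((i : Int) + L)) = x) := by
  induction ls generalizing acc with
  | nil => simp
  | cons L ls ih =>
    rw [List.foldl_cons]
    simp only
    by_cases h : PySem.Set.contains pvLangSet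
        (PySem.Str.slice s (some (i : Int)) (some ((i : Int) + L))) = true
    · rw [if_pos h, ih]
      have hw : PySem.Str.slice s (some (i : Int)) (some ((i : Int) + L)) ∈ pvLangSet :=
        (PySem.Set.contains_iff _ _).mp h
      simp only [PySem.Set.mem_add, List.mem_cons]
      constructor
      · rintro (⟨hx | rfl⟩ | ⟨hs, Lw, hLw, hsl⟩)
        · exact Or.inl hx
        · exact Or.inr ⟨hw, L, Or.inl rfl, rfl⟩
        · exact Or.inr ⟨hs, Lw, Or.inr hLw, hsl⟩
      · rintro (hx | ⟨hs, Lw, rfl | hLw, hsl⟩)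
        · exact Or.inl (Or.inl hx)
        · exact Or.inl (Or.inr hsl.symm)
        · exact Or.inr ⟨hs, Lw, hLw, hsl⟩
    · rw [if_neg h, ih]
      simp only [List.mem_cons]
      constructor
      · rintro (hx | ⟨hs, Lw, hLw, hsl⟩)
        · exact Or.inl hx
        · exact Or.inr ⟨hs, Lw, Or.inr hLw, hsl⟩
      · rintro (hx | ⟨hs, Lw, rfl | hLw, hsl⟩)
        · exact Or.inl hx
        · exact absurd ((PySem.Set.contains_iff _ _).mpr (hsl ▸ hs)) h
        · exact Or.inr ⟨hs, Lw, hLw, hsl⟩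

-- membership in the position fold (over i in range(len s))
theorem mem_pos_fold (s : String) (ns : List Nat) (acc : PySem.Set String) (x : String) :
    x ∈ ns.foldl
        (fun found (i : Nat) =>
          pvLengths.foldl
            (fun found L =>
              let w := PySem.Str.slice s (some (i : Int)) (some ((i : Int) + L))
              if PySem.Set.contains pvLangSet w then PySem.Set.add found w else found)
            found) acc
      ↔ x ∈ acc ∨ (x ∈ pvLangSet ∧ ∃ i ∈ ns, ∃ L ∈ pvLengths,
          PySem.Str.slice s (some (i : Int)) (some ((i : Int) + L)) = x) := by
  induction ns generalizing acc with
  | nil => simp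
  | cons i ns ih =>
    rw [List.foldl_cons, ih]
    rw [mem_len_fold]
    simp only [List.mem_cons]
    constructor
    · rintro ((hx | ⟨hs, Lw, hLw, hsl⟩) | ⟨hs, j, hj, Lw, hLw, hsl⟩)
      · exact Or.inl hx
      · exact Or.inr ⟨hs, i, Or.inl rfl, Lw, hLw, hsl⟩
      · exact Or.inr ⟨hs, j, Or.inr hj, Lw, hLw, hsl⟩
    · rintro (hx | ⟨hs, j, rfl | hj, Lw, hLw, hsl⟩)
      · exact Or.inl (Or.inl hx)
      · exact Or.inl (Or.inr ⟨hs, Lw, hLw, hsl⟩)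
      · exact Or.inr ⟨hs, j, hj, Lw, hLw, hsl⟩

-- membership in the outer (skill-driven) fold
theorem mem_outer_fold (skills : List String) (acc : PySem.Set String) (x : String) :
    x ∈ skills.foldl
        (fun found skill =>
          (List.range (PySem.Str.len (PySem.Str.lower skill)).toNat).foldl
            (fun found (i : Nat) =>
              pvLengths.foldl
                (fun found L =>
                  let w := PySem.Str.slice (PySem.Str.lower skill) (some (i : Int))
                      (some ((i : Int) + L))
                  if PySem.Set.contains pvLangSet w then PySem.Set.add found w else found)
                found) found) acc
      ↔ x ∈ acc ∨ (x ∈ pvLangSet ∧ ∃ sk ∈ skills,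
          ∃ i ∈ List.range (PySem.Str.len (PySem.Str.lower sk)).toNat, ∃ L ∈ pvLengths,
          PySem.Str.slice (PySem.Str.lower sk) (some (i : Int)) (some ((i : Int) + L)) = x) := by
  induction skills generalizing acc with
  | nil => simp
  | cons sk sks ih =>
    rw [List.foldl_cons, ih, mem_pos_fold]
    simp only [List.mem_cons]
    constructor
    · rintro ((hx | ⟨hs, j, hj, Lw, hLw, hsl⟩) | ⟨hs, sk', hsk', rest⟩)
      · exact Or.inl hx
      · exact Or.inr ⟨hs, sk, Or.inl rfl, j, hj, Lw, hLw, hsl⟩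
      · exact Or.inr ⟨hs, sk', Or.inr hsk', rest⟩
    · rintro (hx | ⟨hs, sk', rfl | hsk', rest⟩)
      · exact Or.inl (Or.inl hx)
      · exact Or.inl (Or.inr ⟨hs, rest⟩)
      · exact Or.inr ⟨hs, sk', hsk', rest⟩

-- a window of s equals lang iff lang occurs as a substring of s (for our languages)
theorem window_iff_isIn (s lang : String) (hl : lang ∈ pvCommonLangs) :
    (∃ i ∈ List.range (PySem.Str.len s).toNat, ∃ L ∈ pvLengths,
        PySem.Str.slice s (some (i : Int)) (some ((i : Int) + L)) = lang)
      ↔ PySem.Str.isIn lang s = true := by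
  obtain ⟨hne, hlen⟩ := pvLang_facts lang hl
  constructor
  · rintro ⟨i, _, L, hL, heq⟩
    have h0 := pvLengths_nonneg L hL
    have htl : lang.toList = (s.toList.drop i).take L.toNat := by
      have h := congrArg String.toList heq
      simp only [PySem.Str.toList_slice, PySem.Chars.slice_eq_listSlice] at h
      rw [show (i : Int) + L = (i : Int) + (L.toNat : Int) by
            rw [Int.toNat_of_nonneg h0],
          PySem.List.slice_natCast_add] at h
      exact h.symm
    have hpre : lang.toList <+: s.toList.drop i := htl ▸ List.take_prefix _ _
    have := (PySem.Chars.exists_prefix_drop_iff_isIn _ _).mp ⟨i, hpre⟩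
    simpa using this
  · intro h
    have hin : PySem.Chars.isIn lang.toList s.toList = true := by simpa using h
    obtain ⟨j, hpre⟩ := (PySem.Chars.exists_prefix_drop_iff_isIn _ _).mpr hin
    have hj : j < s.toList.length := by
      by_contra hge
      rw [List.drop_eq_nil_of_le (by omega)] at hpre
      exact hne (List.prefix_nil.mp hpre)
    refine ⟨j, ?_, (lang.toList.length : Int), hlen, ?_⟩
    · rw [List.mem_range]
      have : PySem.Str.len s = (s.toList.length : Int) := by
        simp [PySem.Str.len_eq]
      omega
    · apply String.toList_inj.mp
      simp only [PySem.Str.toList_slice, PySem.Chars.slice_eq_listSlice]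
      rw [show (j : Int) + (lang.toList.length : Int)
            = (j : Int) + ((lang.toList.length : Nat) : Int) by norm_cast,
          PySem.List.slice_natCast_add]
      exact (List.prefix_iff_eq_take.mp hpre).symm

-- A's per-language test agrees with membership in B's found set, for languages in the list
theorem cond_eq (skills : List String) (lang : String) (hl : lang ∈ pvCommonLangs) :
    ((skills.map PySem.Str.lower).contains lang
      || (skills.map PySem.Str.lower).any (fun skill => PySem.Str.isIn lang skill))
    = PySem.Set.contains
        (skills.foldl
          (fun found skill =>
            (List.range (PySem.Str.len (PySem.Str.lower skill)).toNat).foldl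
              (fun found (i : Nat) =>
                pvLengths.foldl
                  (fun found L =>
                    let w := PySem.Str.slice (PySem.Str.lower skill) (some (i : Int))
                        (some ((i : Int) + L))
                    if PySem.Set.contains pvLangSet w then PySem.Set.add found w else found)
                  found) found) PySem.Set.empty) lang := by
  rw [Bool.eq_iff_iff]
  simp only [Bool.or_eq_true, List.contains_eq_mem, List.mem_map, List.any_eq_true,
    decide_eq_true_eq]
  rw [PySem.Set.contains_iff, mem_outer_fold]
  constructor
  · rintro (⟨sk, hsk, rfl⟩ | ⟨sk, ⟨sk', hsk', rfl⟩, hin⟩)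
    · refine Or.inr ⟨(PySem.Set.mem_ofList _ _).mpr hl,
        sk, hsk, (window_iff_isIn _ _ hl).mpr ?_⟩
      rw [PySem.Str.isIn_iff_infix]
    · exact Or.inr ⟨(PySem.Set.mem_ofList _ _).mpr hl,
        sk', hsk', (window_iff_isIn _ _ hl).mpr hin⟩
  · rintro (hx | ⟨_, sk, hsk, hwin⟩)
    · simp [PySem.Set.empty] at hx
    · exact Or.inr ⟨PySem.Str.lower sk, ⟨sk, hsk, rfl⟩,
        (window_iff_isIn _ _ hl).mp hwin⟩

-- ===== VERDICT (by name: the statement is the Claim_ definition above) =====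
theorem extract_languages_from_skills_py_spec : Claim_equal_extract_languages_from_skills_py := by
  intro skills _
  unfold Spec_extract_languages_from_skills_py
  unfold extract_languages_from_skills_py extract_languages_from_skills_py_alt
  rw [PySem.List.foldl_append_if
      (fun lang => (skills.map PySem.Str.lower).contains lang
        || (skills.map PySem.Str.lower).any (fun skill => PySem.Str.isIn lang skill))
      pyCapitalize, List.nil_append,
    List.filter_congr (fun lang hl => cond_eq skills lang hl)]
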